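-- pv_equiv track=rewrite | github.com/SackOfHacks/pcapper | pcapper/creds.py | _extract_path_symbols
-- ===== SOURCE A (Python) =====
-- def _extract_path_symbols(path_str: str) -> list[str]:
--     if not path_str:
--         return []
--     values: list[str] = []
--     for segment in path_str.split("/"):
--         if not segment.startswith("Symbol:"):
--             continue
--         symbol = segment.split(":", 1)[-1].strip()
--         if symbol:
--             values.append(symbol)
--     return values
-- ===== SOURCE B (Python) =====
-- def _extract_path_symbols(path_str: str) -> list[str]:
--     # single left-to-right character scan with an explicit segment buffer
--     # (no split calls); a sentinel "/" flushes the final segment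
--     out: list[str] = []
--     buf: list[str] = []
--     for ch in path_str + "/":
--         if ch == "/":
--             t = "".join(buf[7:]).strip()
--             if "".join(buf[:7]) == "Symbol:" and t:
--                 out.append(t)
--             buf = []
--         else:
--             buf.append(ch)
--     return out
-- ===== Notes on version B (the rewrite author's own statement) =====
-- stated objective: alternative
-- what changed: Replaces A's split-on-slash followed by per-segment startswith and maxsplit-1 colon split with a single left-to-right character scan that maintains an explicit segment buffer, flushing it at each slash (plus one trailing sentinel slash) and testing the buffer by comparing its first seven characters.
import Mathlib
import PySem

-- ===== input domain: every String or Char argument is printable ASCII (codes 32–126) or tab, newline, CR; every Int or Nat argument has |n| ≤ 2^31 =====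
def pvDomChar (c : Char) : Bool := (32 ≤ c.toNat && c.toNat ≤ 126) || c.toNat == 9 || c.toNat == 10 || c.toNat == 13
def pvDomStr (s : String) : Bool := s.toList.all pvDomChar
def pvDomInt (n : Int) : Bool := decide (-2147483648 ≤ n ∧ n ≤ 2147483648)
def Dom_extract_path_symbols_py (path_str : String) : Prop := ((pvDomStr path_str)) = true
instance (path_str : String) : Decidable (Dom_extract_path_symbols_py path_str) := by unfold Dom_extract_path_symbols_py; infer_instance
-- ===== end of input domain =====

-- B replaces A's split("/")-then-per-segment loop by a single left-to-right character
-- scan with an explicit segment buffer (alternative decomposition, same cost class).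

-- ===== PORT A =====
-- loop body of A's 'for segment in path_str.split("/")'
def pvEmitA (values : List String) (segment : List Char) : List String :=
  if ¬ (PySem.Chars.startswith segment "Symbol:".toList) then values
  else
    -- symbol = segment.split(":", 1)[-1].strip()
    let symbol := PySem.Chars.strip ((PySem.Chars.splitOnMax segment [':'] 1).getLastD [])
    if symbol ≠ [] then values ++ [String.ofList symbol] else values

def extract_path_symbols_py (path_str : String) : List String :=
  if path_str = "" then []
  else (PySem.Chars.splitOn path_str.toList ['/']).foldl pvEmitA []

-- ===== PORT B =====
-- loop body of B's 'for ch in path_str + "/"'; state = (out, buf)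
def pvStepB (st : List String × List Char) (ch : Char) : List String × List Char :=
  if ch = '/' then
    let t := PySem.Chars.strip (PySem.List.slice st.2 (some 7) none)
    if PySem.List.slice st.2 none (some 7) = "Symbol:".toList ∧ t ≠ []
    then (st.1 ++ [String.ofList t], [])
    else (st.1, [])
  else (st.1, st.2 ++ [ch])

def extract_path_symbols_py_alt (path_str : String) : List String :=
  ((path_str.toList ++ ['/']).foldl pvStepB ([], [])).1

-- ===== PRECONDITION & SPEC =====
def Spec_extract_path_symbols_py (path_str : String) (out : List String) : Prop := out = extract_path_symbols_py_alt path_str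
instance (path_str : String) (out : List String) : Decidable (Spec_extract_path_symbols_py path_str out) := by unfold Spec_extract_path_symbols_py; infer_instance

-- ===== CLAIM (what is proved, stated in full; the proofs are below) =====
def Claim_equal_extract_path_symbols_py : Prop := ∀ (path_str : String), Dom_extract_path_symbols_py path_str → Spec_extract_path_symbols_py path_str (extract_path_symbols_py path_str)

-- ===== LEMMAS AND PROOFS =====

-- structural split on '/': first segment and remaining segments
def pvSC : List Char → List Char × List (List Char)
  | [] => ([], [])
  | c :: r =>
    let p := pvSC r
    if c = '/' then ([], p.1 :: p.2) else (c :: p.1, p.2)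

theorem pvGo_slash (fuel : Nat) : ∀ (l cur : List Char) (acc : List (List Char)),
    l.length ≤ fuel →
    PySem.Chars.splitOn.go ['/'] fuel l cur acc
      = acc.reverse ++ (cur.reverse ++ (pvSC l).1) :: (pvSC l).2 := by
  induction fuel with
  | zero =>
    intro l cur acc h
    have hl : l = [] := List.eq_nil_of_length_eq_zero (Nat.le_zero.mp h)
    subst hl
    simp [PySem.Chars.splitOn.go, pvSC]
  | succ n ih =>
    intro l cur acc h
    cases l with
    | nil => simp [PySem.Chars.splitOn.go, pvSC]
    | cons c rest =>
      by_cases hc : c = '/'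
      · subst hc
        rw [PySem.Chars.splitOn.go]
        rw [if_pos (by simp [List.isPrefixOf])]
        simp only [List.length_singleton, List.drop_one, List.tail_cons]
        rw [ih rest [] (cur.reverse :: acc) (by simp at h; omega)]
        simp [pvSC]
      · rw [PySem.Chars.splitOn.go]
        rw [if_neg (by simp [List.isPrefixOf, Ne.symm hc])]
        rw [ih rest (c :: cur) acc (by simp at h; omega)]
        simp [pvSC, hc]

theorem pvSplitOn_slash (l : List Char) :
    PySem.Chars.splitOn l ['/'] = (pvSC l).1 :: (pvSC l).2 := by
  unfold PySem.Chars.splitOn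
  rw [pvGo_slash (l.length + 1) l [] [] (by omega)]
  simp

-- splitOnMax with maxsplit exhausted dumps the rest
theorem pvGoMax_zero (n : Nat) (l cur : List Char) (acc : List (List Char)) :
    PySem.Chars.splitOnMax.go [':'] n 0 l cur acc = ((cur.reverse ++ l) :: acc).reverse := by
  cases n with
  | zero => rw [PySem.Chars.splitOnMax.go]
  | succ m =>
    cases l with
    | nil => simp [PySem.Chars.splitOnMax.go]
    | cons c rest => simp [PySem.Chars.splitOnMax.go]

theorem pvGoMax_step (n : Nat) (c : Char) (l cur : List Char) (acc : List (List Char))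
    (hc : c ≠ ':') :
    PySem.Chars.splitOnMax.go [':'] (n + 1) 1 (c :: l) cur acc
      = PySem.Chars.splitOnMax.go [':'] n 1 l (c :: cur) acc := by
  simp [PySem.Chars.splitOnMax.go, List.isPrefixOf, Ne.symm hc]

theorem pvGoMax_colon (n : Nat) (l cur : List Char) (acc : List (List Char)) :
    PySem.Chars.splitOnMax.go [':'] (n + 1) 1 (':' :: l) cur acc
      = PySem.Chars.splitOnMax.go [':'] n 0 l [] (cur.reverse :: acc) := by
  simp [PySem.Chars.splitOnMax.go, List.isPrefixOf]

theorem pvGoMax_run (pre : List Char) (hp : ':' ∉ pre) : ∀ (n : Nat) (l cur : List Char) (acc : List (List Char)),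
    PySem.Chars.splitOnMax.go [':'] (pre.length + (n + 1)) 1 (pre ++ l) cur acc
      = PySem.Chars.splitOnMax.go [':'] (n + 1) 1 l (pre.reverse ++ cur) acc := by
  induction pre with
  | nil => intro n l cur acc; simp
  | cons c pre' ih =>
    intro n l cur acc
    have hc : c ≠ ':' := fun h => hp (h ▸ List.mem_cons_self)
    have : (c :: pre').length + (n + 1) = (pre'.length + (n + 1)) + 1 := by simp; omega
    rw [List.cons_append, this, pvGoMax_step _ _ _ _ _ hc,
        ih (fun h => hp (List.mem_cons_of_mem _ h)) n l (c :: cur) acc]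
    simp

-- A's segment.split(":", 1)[-1] on a segment "Symbol:" ++ r is exactly r
theorem pvSplitMax_symbol (r : List Char) :
    (PySem.Chars.splitOnMax ("Symbol:".toList ++ r) [':'] 1).getLastD [] = r := by
  unfold PySem.Chars.splitOnMax
  rw [if_neg (by norm_num)]
  have hfuel : ("Symbol:".toList ++ r).length + 1 = "Symbol".toList.length + ((r.length + 1) + 1) := by
    simp
    omega
  have hsplit : "Symbol:".toList ++ r = "Symbol".toList ++ (':' :: r) := rfl
  rw [Int.toNat_one, hfuel, hsplit, pvGoMax_run "Symbol".toList (by decide) (r.length + 1) (':' :: r) [] []]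
  rw [pvGoMax_colon, pvGoMax_zero]
  simp

-- B's per-flush action equals A's per-segment action
theorem pvEmit_eq (out : List String) (seg : List Char) :
    (pvStepB (out, seg) '/').1 = pvEmitA out seg := by
  unfold pvStepB pvEmitA
  rw [if_pos rfl]
  by_cases hp : PySem.Chars.startswith seg "Symbol:".toList = true
  · obtain ⟨r, hr⟩ := (PySem.Chars.startswith_iff seg "Symbol:".toList).mp hp
    subst hr
    rw [if_neg (not_not_intro hp)]
    have h1 : PySem.List.slice ("Symbol:".toList ++ r) none (some 7) = "Symbol:".toList := by
      simp [PySem.List.slice]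
    have h2 : PySem.List.slice ("Symbol:".toList ++ r) (some 7) none = r := by
      simp [PySem.List.slice]
    rw [h1, h2, pvSplitMax_symbol]
    by_cases ht : PySem.Chars.strip r = []
    · rw [if_neg (by simp [ht]), if_neg (by simp [ht])]
    · rw [if_pos ⟨rfl, ht⟩, if_pos ht]
  · rw [if_pos hp]
    have hne : PySem.List.slice seg none (some 7) ≠ "Symbol:".toList := by
      intro he
      apply hp
      rw [PySem.Chars.startswith_iff]
      have h7 : 7 ≤ seg.length := by
        have := congrArg List.length he
        simp [PySem.List.slice] at this
        omega
      have : seg.take 7 = "Symbol:".toList := by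
        have hmin : min 7 seg.length = 7 := by omega
        simpa [PySem.List.slice, hmin] using he
      exact this ▸ List.take_prefix 7 seg
    rw [if_neg (fun h => hne h.1)]

-- the scanner over cs ++ ['/'] folds A's action over buf-completed segments
theorem pvScan (cs : List Char) : ∀ (out : List String) (buf : List Char),
    ((cs ++ ['/']).foldl pvStepB (out, buf)).1
      = ((buf ++ (pvSC cs).1) :: (pvSC cs).2).foldl pvEmitA out := by
  induction cs with
  | nil =>
    intro out buf
    simp only [List.nil_append, List.foldl_cons, List.foldl_nil, pvSC]
    rw [pvEmit_eq]
    simp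
  | cons c rest ih =>
    intro out buf
    by_cases hc : c = '/'
    · subst hc
      simp only [List.cons_append, List.foldl_cons]
      have hstep : pvStepB (out, buf) '/' = ((pvStepB (out, buf) '/').1, []) := by
        unfold pvStepB
        rw [if_pos rfl]
        by_cases hc : PySem.List.slice buf none (some 7) = "Symbol:".toList ∧
            PySem.Chars.strip (PySem.List.slice buf (some 7) none) ≠ []
        · rw [if_pos hc]
        · rw [if_neg hc]
      rw [hstep, pvEmit_eq, ih]
      simp [pvSC]
    · simp only [List.cons_append, List.foldl_cons]
      have hstep : pvStepB (out, buf) c = (out, buf ++ [c]) := by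
        unfold pvStepB; rw [if_neg hc]
      rw [hstep, ih]
      simp [pvSC, hc]

theorem pvMain (path_str : String) :
    extract_path_symbols_py path_str = extract_path_symbols_py_alt path_str := by
  unfold extract_path_symbols_py extract_path_symbols_py_alt
  by_cases h : path_str = ""
  · subst h
    rw [if_pos rfl]
    show ([] : List String) = (List.foldl pvStepB ([], []) ([] ++ ['/'])).1
    rw [pvScan [] [] []]
    decide
  · rw [if_neg h, pvSplitOn_slash, pvScan]
    simp

-- ===== VERDICT (by name: the statement is the Claim_ definition above) =====
theorem extract_path_symbols_py_spec : Claim_equal_extract_path_symbols_py := by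
  intro path_str _
  unfold Spec_extract_path_symbols_py
  exact pvMain path_str
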